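-- pv_equiv track=rewrite | github.com/alepsio/crm | app.py | is_valid_codice_fiscale
-- ===== SOURCE A (Python) =====
-- def is_valid_codice_fiscale(cf):
--     """
--     Verifica che il codice fiscale abbia un formato valido:
--     - 16 caratteri
--     - I primi 6 sono lettere
--     - I successivi 2 sono numeri
--     - Il successivo è una lettera
--     - I successivi 2 sono numeri
--     - Il successivo è una lettera
--     - I successivi 3 sono numeri
--     - L'ultimo è una lettera
--     """
--     if not cf:
--         return False, "Codice fiscale mancante"
--
--     # Tronca il codice fiscale a 16 caratteri se è più lungo
--     if len(cf) > 16: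
--         cf = cf[:16]
--
--     if len(cf) != 16:
--         return False, "Il codice fiscale deve essere di 16 caratteri"
--
--     cf = cf.upper()
--
--     # Verifica il pattern generale
--     if not (
--         all(c.isalpha() for c in cf[0:6]) and
--         all(c.isdigit() for c in cf[6:8]) and
--         cf[8].isalpha() and
--         all(c.isdigit() for c in cf[9:11]) and
--         cf[11].isalpha() and
--         all(c.isdigit() for c in cf[12:15]) and
--         cf[15].isalpha()
--     ):
--         return False, "Formato del codice fiscale non valido"
--
--     return True, "Codice fiscale valido"
-- ===== SOURCE B (Python) =====
-- def is_valid_codice_fiscale(cf):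
--     if not cf:
--         return False, "Codice fiscale mancante"
--     if len(cf) > 16:
--         cf = cf[:16]
--     if len(cf) != 16:
--         return False, "Il codice fiscale deve essere di 16 caratteri"
--     cf = cf.upper()
--     # classify every character once into a signature, then compare with the pattern
--     sig = ''.join('A' if c.isalpha() else 'D' if c.isdigit() else '?' for c in cf)
--     if sig == "AAAAAADDADDADDDA":
--         return True, "Codice fiscale valido"
--     return False, "Formato del codice fiscale non valido"
-- ===== Notes on version B (the rewrite author's own statement) =====
-- stated objective: alternative
-- what changed: Instead of checking seven fixed slices/indices with a boolean conjunction, B maps each character once to a class tag (letter/digit/other) building a 16-char signature string, and decides validity by a single string equality against a fixed pattern literal.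
import Mathlib
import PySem

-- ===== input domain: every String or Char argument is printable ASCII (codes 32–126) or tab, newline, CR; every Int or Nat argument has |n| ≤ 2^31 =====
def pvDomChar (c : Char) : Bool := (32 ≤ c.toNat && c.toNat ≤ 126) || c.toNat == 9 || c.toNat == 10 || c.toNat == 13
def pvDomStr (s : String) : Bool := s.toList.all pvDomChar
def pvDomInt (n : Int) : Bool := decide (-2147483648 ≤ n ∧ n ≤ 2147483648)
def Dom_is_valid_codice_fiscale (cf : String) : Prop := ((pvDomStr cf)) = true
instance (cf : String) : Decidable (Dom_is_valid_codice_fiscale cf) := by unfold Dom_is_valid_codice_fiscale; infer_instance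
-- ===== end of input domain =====

-- B replaces A's seven-clause slice-and-index conjunction by a one-pass character
-- classification: map each char to a class tag, compare the signature string to a
-- fixed pattern literal (objective: alternative decomposition, same cost).

-- ===== PORT A =====
-- literal transliteration of A; cf[8] etc. are guarded by the length-16 check
def is_valid_codice_fiscale (cf : String) : Bool × String :=
  let l := cf.toList
  if l = [] then (false, "Codice fiscale mancante")
  else
    let l := if 16 < l.length then PySem.List.slice l none (some 16) else l
    if l.length ≠ 16 then (false, "Il codice fiscale deve essere di 16 caratteri")
    else
      let u := PySem.Chars.upper l
      if ¬ ((PySem.List.slice u (some 0) (some 6)).all PySem.Chars.isalpha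
          && (PySem.List.slice u (some 6) (some 8)).all PySem.Chars.isdigit
          && ((PySem.List.pyGet? u 8).elim false PySem.Chars.isalpha)
          && (PySem.List.slice u (some 9) (some 11)).all PySem.Chars.isdigit
          && ((PySem.List.pyGet? u 11).elim false PySem.Chars.isalpha)
          && (PySem.List.slice u (some 12) (some 15)).all PySem.Chars.isdigit
          && ((PySem.List.pyGet? u 15).elim false PySem.Chars.isalpha))
      then (false, "Formato del codice fiscale non valido")
      else (true, "Codice fiscale valido")

-- ===== PORT B =====
-- class tag of one character: 'A' letter, 'D' digit, '?' anything else
def cfTag (c : Char) : Char :=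
  if PySem.Chars.isalpha c then 'A' else if PySem.Chars.isdigit c then 'D' else '?'

def is_valid_codice_fiscale_alt (cf : String) : Bool × String :=
  let l := cf.toList
  if l = [] then (false, "Codice fiscale mancante")
  else
    let l := if 16 < l.length then PySem.List.slice l none (some 16) else l
    if l.length ≠ 16 then (false, "Il codice fiscale deve essere di 16 caratteri")
    else
      let sig := (PySem.Chars.upper l).map cfTag
      if sig = "AAAAAADDADDADDDA".toList then (true, "Codice fiscale valido")
      else (false, "Formato del codice fiscale non valido")

-- ===== PRECONDITION & SPEC =====
def Spec_is_valid_codice_fiscale (cf : String) (out : Bool × String) : Prop := out = is_valid_codice_fiscale_alt cf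
instance (cf : String) (out : Bool × String) : Decidable (Spec_is_valid_codice_fiscale cf out) := by unfold Spec_is_valid_codice_fiscale; infer_instance

-- ===== CLAIM =====
def Claim_equal_is_valid_codice_fiscale : Prop := ∀ (cf : String), Dom_is_valid_codice_fiscale cf → Spec_is_valid_codice_fiscale cf (is_valid_codice_fiscale cf)

-- ===== LEMMAS AND PROOFS =====

-- Python's isalpha and isdigit are disjoint (here: ASCII letter vs digit ranges)
theorem alpha_not_digit (c : Char) (h : PySem.Chars.isalpha c = true) :
    PySem.Chars.isdigit c = false := by
  simp only [PySem.Chars.isalpha, PySem.Chars.isupper, PySem.Chars.islower,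
    Bool.or_eq_true, Bool.and_eq_true, decide_eq_true_eq] at h
  simp only [PySem.Chars.isdigit, Bool.and_eq_false_iff, decide_eq_false_iff_not, not_le]
  rcases h with ⟨h1, _⟩ | ⟨h1, _⟩ <;> right
  · exact lt_of_lt_of_le (by decide : ('9' : Char) < 'A') h1
  · exact lt_of_lt_of_le (by decide : ('9' : Char) < 'a') h1

theorem tag_eq_A (c : Char) : (cfTag c = 'A') ↔ PySem.Chars.isalpha c = true := by
  unfold cfTag
  by_cases h : PySem.Chars.isalpha c = true <;> simp [h] <;> split <;> simp

theorem tag_eq_D (c : Char) : (cfTag c = 'D') ↔ PySem.Chars.isdigit c = true := by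
  unfold cfTag
  by_cases h : PySem.Chars.isalpha c = true
  · simp [h, alpha_not_digit c h]
  · by_cases hd : PySem.Chars.isdigit c = true <;> simp [h, hd]

-- on a length-16 list, A's big conjunction holds iff B's signature equals the pattern
theorem cfCond_eq_sig (u : List Char) (h : u.length = 16) :
    ((PySem.List.slice u (some 0) (some 6)).all PySem.Chars.isalpha
      && (PySem.List.slice u (some 6) (some 8)).all PySem.Chars.isdigit
      && ((PySem.List.pyGet? u 8).elim false PySem.Chars.isalpha)
      && (PySem.List.slice u (some 9) (some 11)).all PySem.Chars.isdigit
      && ((PySem.List.pyGet? u 11).elim false PySem.Chars.isalpha)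
      && (PySem.List.slice u (some 12) (some 15)).all PySem.Chars.isdigit
      && ((PySem.List.pyGet? u 15).elim false PySem.Chars.isalpha)) = true
      ↔ u.map cfTag = "AAAAAADDADDADDDA".toList := by
  have hp : "AAAAAADDADDADDDA".toList
      = ['A','A','A','A','A','A','D','D','A','D','D','A','D','D','D','A'] := by decide
  match u, h with
  | [a0,a1,a2,a3,a4,a5,a6,a7,a8,a9,a10,a11,a12,a13,a14,a15], _ =>
    rw [hp]
    simp only [PySem.List.slice, PySem.List.clampIdx, PySem.List.pyGet?, PySem.List.pyIdx?,
      List.map]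
    simp [tag_eq_A, tag_eq_D, and_assoc]


theorem length_upper (l : List Char) : (PySem.Chars.upper l).length = l.length := by
  simp [PySem.Chars.upper]

-- ===== VERDICT =====
theorem is_valid_codice_fiscale_spec : Claim_equal_is_valid_codice_fiscale := by
  intro cf _
  unfold Spec_is_valid_codice_fiscale is_valid_codice_fiscale is_valid_codice_fiscale_alt
  by_cases hnil : cf.toList = []
  · simp [hnil]
  · simp only [hnil, if_false]
    set l := if 16 < cf.toList.length then PySem.List.slice cf.toList none (some 16) else cf.toList with hl
    by_cases hlen : l.length ≠ 16
    · simp [hlen]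
    · replace hlen := not_ne_iff.mp hlen
      have hu : (PySem.Chars.upper l).length = 16 := by rw [length_upper, hlen]
      simp only [hlen, ne_eq, not_true_eq_false, if_false]
      by_cases hc : (PySem.Chars.upper l).map cfTag = "AAAAAADDADDADDDA".toList
      · rw [if_pos hc, if_neg (not_not_intro ((cfCond_eq_sig _ hu).mpr hc))]
      · rw [if_neg hc, if_pos (fun hb => hc ((cfCond_eq_sig _ hu).mp hb))]
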